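-- pv_equiv track=rewrite | github.com/gaushwravetu/Coding-Problems | Leetcode/Leetcode Daily/Assign_element1.py | assign_elements
-- ===== SOURCE A (Python) =====
-- from typing import List
--
-- def assign_elements(groups: List[int], elements: List[int]) -> List[int]:
--     n = len(groups)
--     m = len(elements)
--     assigned = [-1] * n
--
--     # Preprocess elements: store the smallest index for each unique element value
--     element_map = {}
--     for j in range(m):
--         if elements[j] not in element_map:
--             element_map[elements[j]] = j
--
--     # Iterate over each group
--     for i in range(n):
--         group_size = groups[i]
--         min_index = float('inf')
--
--         # Find all divisors of group_size and check if they exist in element_map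
--         d = 1
--         while d * d <= group_size:
--             if group_size % d == 0:
--                 # Check divisor d
--                 if d in element_map:
--                     min_index = min(min_index, element_map[d])
--                 # Check divisor group_size // d
--                 if d != group_size // d and (group_size // d) in element_map:
--                     min_index = min(min_index, element_map[group_size // d])
--             d += 1
--
--         # Assign the smallest index or -1 if no divisor found
--         assigned[i] = min_index if min_index != float('inf') else -1
--
--     return assigned
-- ===== SOURCE B (Python) =====
-- from typing import List
--
-- def assign_elements(groups: List[int], elements: List[int]) -> List[int]:
--     # For each group size, scan elements left to right and return the first
--     # (hence smallest) index whose value is a positive divisor of the size.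
--     def first_divisor_index(g: int) -> int:
--         if g <= 0:
--             return -1  # a non-positive group size has no positive divisor element
--         for j, e in enumerate(elements):
--             if e > 0 and g % e == 0:
--                 return j
--         return -1
--     return [first_divisor_index(g) for g in groups]
-- ===== Notes on version B (the rewrite author's own statement) =====
-- stated objective: simpler
-- what changed: Replaces the first-index map plus per-group sqrt divisor enumeration by a direct left-to-right scan of elements returning the first index whose value is a positive divisor of the group size (the first match is automatically the smallest index).
import Mathlib
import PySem

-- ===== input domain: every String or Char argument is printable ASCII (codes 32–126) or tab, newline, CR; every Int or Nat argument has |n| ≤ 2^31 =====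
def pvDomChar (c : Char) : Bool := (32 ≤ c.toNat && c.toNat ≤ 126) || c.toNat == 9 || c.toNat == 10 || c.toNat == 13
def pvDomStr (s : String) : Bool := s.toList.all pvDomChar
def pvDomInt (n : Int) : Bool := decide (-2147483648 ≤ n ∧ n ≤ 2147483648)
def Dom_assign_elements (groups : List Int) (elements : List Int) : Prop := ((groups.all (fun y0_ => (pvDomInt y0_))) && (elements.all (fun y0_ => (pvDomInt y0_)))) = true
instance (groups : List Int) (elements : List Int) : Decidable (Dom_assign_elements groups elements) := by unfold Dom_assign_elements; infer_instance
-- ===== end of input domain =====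

-- B replaces A's first-index map plus per-group sqrt divisor enumeration by a direct
-- first-match scan of elements per group (objective: simpler; same return values).

-- ===== PORT A =====
-- element_map build: for j in range(m): if elements[j] not in element_map: element_map[elements[j]] = j
def pvElemMap (elements : List Int) : PySem.Dict Int Int :=
  (PySem.List.pyRange 0 (PySem.List.len elements) 1).foldl
    (fun em j =>
      let v := PySem.List.pyGetD elements j 0
      if em.contains v then em else em.insert v j)
    PySem.Dict.empty

-- min(min_index, j) with min_index possibly float('inf') (represented as none)
def pvOptMin (mi : Option Int) (j : Int) : Option Int :=
  match mi with
  | none => some j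
  | some x => some (min x j)

-- the `while d*d <= group_size` divisor loop of A
def pvDivLoop (g : Int) (em : PySem.Dict Int Int) (d : Int) (mi : Option Int) : Option Int :=
  if h : d * d ≤ g then
    let mi1 :=
      if PySem.Int.mod g d = 0 then
        let mi' := match em.get? d with
          | some j => pvOptMin mi j
          | none => mi
        if d ≠ PySem.Int.floordiv g d then
          match em.get? (PySem.Int.floordiv g d) with
          | some j => pvOptMin mi' j
          | none => mi'
        else mi'
      else mi
    pvDivLoop g em (d + 1) mi1
  else mi
termination_by (g + 1 - d).toNat
decreasing_by
  have hd : d ≤ g := by nlinarith [mul_self_nonneg d]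
  omega

def assign_elements (groups : List Int) (elements : List Int) : List Int :=
  let n := PySem.List.len groups
  let em := pvElemMap elements
  (PySem.List.pyRange 0 n 1).foldl
    (fun assigned i =>
      let g := PySem.List.pyGetD groups i 0
      let mi := pvDivLoop g em 1 none
      assigned.set i.toNat (mi.getD (-1)))
    (PySem.List.pyRepeat [-1] n)

-- ===== PORT B =====
-- for j, e in enumerate(elements): if e > 0 and g % e == 0: return j / fall through to -1
def pvScan (g : Int) (l : List Int) (j : Int) : Int :=
  match l with
  | [] => -1
  | e :: rest => if 0 < e ∧ PySem.Int.mod g e = 0 then j else pvScan g rest (j + 1)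

def assign_elements_alt (groups : List Int) (elements : List Int) : List Int :=
  groups.map (fun g => if g ≤ 0 then -1 else pvScan g elements 0)

-- ===== PRECONDITION & SPEC =====
def Spec_assign_elements (groups : List Int) (elements : List Int) (out : List Int) : Prop := out = assign_elements_alt groups elements
instance (groups : List Int) (elements : List Int) (out : List Int) : Decidable (Spec_assign_elements groups elements out) := by unfold Spec_assign_elements; infer_instance

-- ===== CLAIM (what is proved, stated in full; the proofs are below) =====
def Claim_equal_assign_elements : Prop := ∀ (groups : List Int) (elements : List Int), Dom_assign_elements groups elements → Spec_assign_elements groups elements (assign_elements groups elements)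

-- ===== LEMMAS AND PROOFS =====

-- the multiset of divisor values A's while-loop looks up, as a list
def pvDivs (g : Int) (d : Int) : List Int :=
  if h : d * d ≤ g then
    (if PySem.Int.mod g d = 0 then
       d :: (if d ≠ PySem.Int.floordiv g d then [PySem.Int.floordiv g d] else [])
     else []) ++ pvDivs g (d + 1)
  else []
termination_by (g + 1 - d).toNat
decreasing_by
  have hd : d ≤ g := by nlinarith [mul_self_nonneg d]
  omega

-- A's loop is the min-fold of em-lookups over pvDivs
theorem pvDivLoop_eq_foldl (g : Int) (em : PySem.Dict Int Int) (d : Int) (mi : Option Int) :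
    pvDivLoop g em d mi = (pvDivs g d).foldl
      (fun mi v => match em.get? v with | some j => pvOptMin mi j | none => mi) mi := by
  rw [pvDivLoop, pvDivs]
  split
  · rename_i h
    rw [pvDivLoop_eq_foldl g em (d+1)]
    rw [List.foldl_append]
    congr 1
    split_ifs <;> simp only [List.foldl_cons, List.foldl_nil]
  · rfl
termination_by (g + 1 - d).toNat
decreasing_by
  have hd : d ≤ g := by nlinarith [mul_self_nonneg d]
  omega

-- the element-map fold builds the first-index map
theorem emStep (xs : List Int) (s : Int) (em : PySem.Dict Int Int) (v : Int) :
    ((PySem.List.enumerate xs s).foldl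
        (fun em p => if em.contains p.2 then em else em.insert p.2 p.1) em).get? v
      = if em.contains v then em.get? v
        else (PySem.List.index? xs v).map (fun (k : Nat) => s + (k : Int)) := by
  induction xs generalizing s em with
  | nil =>
    rw [PySem.List.enumerate_nil, List.foldl_nil]
    split_ifs with h
    · rfl
    · rw [(PySem.Dict.get?_eq_none_iff_contains em v).mpr (by simpa using h)]
      simp
  | cons x rest ih =>
    rw [PySem.List.enumerate_cons, List.foldl_cons]
    by_cases hc : em.contains x
    · rw [if_pos hc, ih]
      by_cases hv : em.contains v
      · rw [if_pos hv, if_pos hv]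
      · rw [if_neg hv, if_neg hv]
        by_cases hxv : x = v
        · exact absurd (hxv ▸ hc) hv
        · rw [PySem.List.index?_cons_of_ne rest hxv]
          cases h : PySem.List.index? rest v <;> simp <;> push_cast <;> ring
    · rw [if_neg hc, ih]
      by_cases hxv : x = v
      · subst hxv
        rw [if_pos (PySem.Dict.contains_insert_self _ _ _), PySem.Dict.get?_insert_self,
          if_neg hc, PySem.List.index?_cons_self]
        simp
      · have hce : (em.insert x s).contains v = em.contains v := by
          rw [PySem.Dict.contains_insert]
          simp [Ne.symm hxv]
        rw [hce]
        by_cases hv : em.contains v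
        · rw [if_pos hv, if_pos hv, PySem.Dict.get?_insert_of_ne _ _ (Ne.symm hxv)]
        · rw [if_neg hv, if_neg hv, PySem.List.index?_cons_of_ne rest hxv]
          cases h : PySem.List.index? rest v <;> simp <;> push_cast <;> ring

theorem pvElemMap_get? (elements : List Int) (v : Int) :
    (pvElemMap elements).get? v = (PySem.List.index? elements v).map (fun (k : Nat) => (k : Int)) := by
  have h1 : pvElemMap elements = (PySem.List.enumerate elements 0).foldl
      (fun em p => if em.contains p.2 then em else em.insert p.2 p.1) PySem.Dict.empty := by
    rw [pvElemMap, PySem.List.enumerate_eq_map_pyRange elements 0, List.foldl_map]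
  rw [h1, emStep]
  simp

-- membership in pvDivs: only positive divisors of g
theorem mem_pvDivs (g d v : Int) (hd : 1 ≤ d) (hmem : v ∈ pvDivs g d) : 1 ≤ v ∧ v ∣ g := by
  rw [pvDivs] at hmem
  split at hmem
  · rename_i hok
    rw [List.mem_append] at hmem
    rcases hmem with hchunk | hrest
    · split at hchunk
      · rename_i hmod
        have hdvd : d ∣ g := (PySem.Int.mod_eq_zero_iff_dvd g d).mp hmod
        rcases List.mem_cons.mp hchunk with rfl | hq
        · exact ⟨hd, hdvd⟩
        · split at hq
          · rcases List.mem_singleton.mp hq with rfl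
            rw [PySem.Int.floordiv_eq_ediv_of_pos (by omega)]
            have hmul : g / d * d = g := Int.ediv_mul_cancel hdvd
            have hq1 : 1 ≤ g / d := by nlinarith
            exact ⟨hq1, ⟨d, hmul.symm⟩⟩
          · simp at hq
      · simp at hchunk
    · exact mem_pvDivs g (d + 1) v (by omega) hrest
  · simp at hmem
termination_by (g + 1 - d).toNat
decreasing_by
  have hdg : d ≤ g := by nlinarith [mul_self_nonneg d]
  omega

-- the loop reaches every u with d ≤ u, u*u ≤ g, u ∣ g — and its cofactor
theorem reach_pvDivs (g d u : Int) (hd : 1 ≤ d) (hdu : d ≤ u) (huu : u * u ≤ g) (hdvd : u ∣ g) :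
    u ∈ pvDivs g d ∧ (u ≠ PySem.Int.floordiv g u → PySem.Int.floordiv g u ∈ pvDivs g d) := by
  have hddg : d * d ≤ g := by nlinarith
  rw [pvDivs, dif_pos hddg]
  rcases eq_or_lt_of_le hdu with rfl | hlt
  · have hmod : PySem.Int.mod g d = 0 := (PySem.Int.mod_eq_zero_iff_dvd g d).mpr hdvd
    rw [if_pos hmod]
    constructor
    · exact List.mem_append_left _ (List.mem_cons_self)
    · intro hne
      refine List.mem_append_left _ (List.mem_cons.mpr (Or.inr ?_))
      rw [if_pos hne]
      exact List.mem_singleton.mpr rfl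
  · have ih := reach_pvDivs g (d + 1) u (by omega) (by omega) huu hdvd
    exact ⟨List.mem_append_right _ ih.1, fun hne => List.mem_append_right _ (ih.2 hne)⟩
termination_by (g + 1 - d).toNat
decreasing_by
  have hdg : d ≤ g := by nlinarith [mul_self_nonneg d]
  omega

theorem mem_pvDivs_iff (g v : Int) (hg : 1 ≤ g) :
    v ∈ pvDivs g 1 ↔ 1 ≤ v ∧ v ∣ g := by
  constructor
  · exact mem_pvDivs g 1 v le_rfl
  · rintro ⟨hv1, hdvd⟩
    by_cases hvv : v * v ≤ g
    · exact (reach_pvDivs g 1 v le_rfl hv1 hvv hdvd).1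
    · push_neg at hvv
      set w := g / v with hw
      have hmul : w * v = g := Int.ediv_mul_cancel hdvd
      have hw1 : 1 ≤ w := by nlinarith
      have hwv : w < v := by nlinarith
      have hww : w * w ≤ g := by nlinarith
      have hwdvd : w ∣ g := ⟨v, hmul.symm⟩
      have hfw : PySem.Int.floordiv g w = v := by
        rw [PySem.Int.floordiv_eq_ediv_of_pos (by omega), ← hmul,
          Int.mul_ediv_cancel_left _ (by omega)]
      have h := (reach_pvDivs g 1 w le_rfl hw1 hww hwdvd).2
      rw [hfw] at h
      exact h (by omega)

-- B's scan is findIdx?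
theorem pvScan_eq (g : Int) (l : List Int) (j : Int) :
    pvScan g l j = match l.findIdx? (fun e => decide (0 < e ∧ PySem.Int.mod g e = 0)) with
      | some k => j + (k : Int)
      | none => -1 := by
  induction l generalizing j with
  | nil => simp [pvScan]
  | cons e rest ih =>
    rw [pvScan, List.findIdx?_cons]
    by_cases h : 0 < e ∧ PySem.Int.mod g e = 0
    · simp only [h, decide_true]
      simp
    · simp only [if_neg h, h, decide_false, ih]
      cases hf : List.findIdx? (fun e => decide (0 < e ∧ PySem.Int.mod g e = 0)) rest <;>
        simp <;> push_cast <;> ring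

-- step-fold = filterMap then pvOptMin-fold
theorem foldl_step_filterMap (em : PySem.Dict Int Int) (L : List Int) (mi : Option Int) :
    L.foldl (fun mi v => match em.get? v with | some j => pvOptMin mi j | none => mi) mi
      = (L.filterMap em.get?).foldl pvOptMin mi := by
  induction L generalizing mi with
  | nil => rfl
  | cons v rest ih =>
    rw [List.foldl_cons, List.filterMap_cons]
    cases h : em.get? v <;> simp only [h, ih, List.foldl_cons]

theorem foldl_pvOptMin_some (as : List Int) (a : Int) :
    as.foldl pvOptMin (some a) = some (as.foldl min a) := by
  induction as generalizing a with
  | nil => rfl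
  | cons b bs ih => rw [List.foldl_cons, List.foldl_cons]; exact ih (min a b)

theorem foldl_pvOptMin_none (C : List Int) :
    C.foldl pvOptMin none = PySem.List.min? C (fun y => y) := by
  cases C with
  | nil => rfl
  | cons a as =>
    rw [List.foldl_cons, PySem.List.min?_id_cons]
    exact foldl_pvOptMin_some as a

-- per-group agreement of the two implementations
theorem perGroup (g : Int) (elements : List Int) :
    (pvDivLoop g (pvElemMap elements) 1 none).getD (-1)
      = if g ≤ 0 then -1 else pvScan g elements 0 := by
  rw [pvDivLoop_eq_foldl, foldl_step_filterMap, foldl_pvOptMin_none]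
  by_cases hg : g ≤ 0
  · have hnil : pvDivs g 1 = [] := by
      rw [pvDivs, dif_neg (by nlinarith)]
    rw [hnil]
    simp [hg, PySem.List.min?]
  · push_neg at hg
    rw [if_neg (by omega), pvScan_eq]
    set C := (pvDivs g 1).filterMap (pvElemMap elements).get? with hC
    cases hf : elements.findIdx? (fun e => decide (0 < e ∧ PySem.Int.mod g e = 0)) with
    | none =>
      have hCnil : C = [] := by
        rw [hC, List.filterMap_eq_nil_iff]
        intro v hv
        rw [pvElemMap_get?]
        cases hidx : PySem.List.index? elements v with
        | none => rfl
        | some m =>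
          exfalso
          obtain ⟨hm, hvm, _⟩ := PySem.List.getElem_of_index?_eq_some hidx
          have hvd := (mem_pvDivs_iff g v (by omega)).mp hv
          have := List.findIdx?_eq_none_iff.mp hf elements[m] (List.getElem_mem hm)
          rw [hvm] at this
          simp only [decide_eq_false_iff_not] at this
          exact this ⟨by omega, (PySem.Int.mod_eq_zero_iff_dvd g v).mpr hvd.2⟩
      rw [hCnil]
      simp [PySem.List.min?]
    | some k =>
      obtain ⟨hk, hpk, hmin⟩ := List.findIdx?_eq_some_iff_getElem.mp hf
      simp only [decide_eq_true_eq] at hpk hmin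
      -- index? elements elements[k] = some k
      have hidx : PySem.List.index? elements elements[k] = some k := by
        have hsome : (PySem.List.index? elements elements[k]).isSome :=
          (PySem.List.index?_isSome_iff elements elements[k]).mpr (List.getElem_mem hk)
        obtain ⟨m, hm⟩ := Option.isSome_iff_exists.mp hsome
        obtain ⟨hmlt, hvm, hfst⟩ := PySem.List.getElem_of_index?_eq_some hm
        have hmk : m ≤ k := by
          by_contra hcon
          exact hfst k (by omega) rfl
        have hkm : ¬ m < k := by
          intro hlt
          have := hmin m hlt
          rw [hvm] at this
          exact this hpk
        have : m = k := by omega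
        subst this
        exact hm
      -- bound: every candidate is ≥ k
      have hbound : ∀ c ∈ C, (k : Int) ≤ c := by
        intro c hc
        rw [hC, List.mem_filterMap] at hc
        obtain ⟨v, hv, hget⟩ := hc
        rw [pvElemMap_get?] at hget
        obtain ⟨m, hm, rfl⟩ := Option.map_eq_some_iff.mp hget
        obtain ⟨hmlt, hvm, _⟩ := PySem.List.getElem_of_index?_eq_some hm
        have hvd := (mem_pvDivs_iff g v (by omega)).mp hv
        have hpm : 0 < elements[m] ∧ PySem.Int.mod g elements[m] = 0 := by
          rw [hvm]
          exact ⟨by omega, (PySem.Int.mod_eq_zero_iff_dvd g v).mpr hvd.2⟩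
        have : ¬ m < k := fun hlt => (hmin m hlt) hpm
        omega
      -- membership: k is a candidate
      have hkC : (k : Int) ∈ C := by
        rw [hC, List.mem_filterMap]
        refine ⟨elements[k], ?_, ?_⟩
        · exact (mem_pvDivs_iff g elements[k] (by omega)).mpr
            ⟨by omega, (PySem.Int.mod_eq_zero_iff_dvd g elements[k]).mp hpk.2⟩
        · rw [pvElemMap_get?, hidx]
          rfl
      cases hm0 : PySem.List.min? C (fun y => y) with
      | none =>
        exact absurd ((PySem.List.min?_eq_none_iff C _).mp hm0 ▸ hkC) (List.not_mem_nil)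
      | some m0 =>
        have h1 : m0 ≤ (k : Int) := PySem.List.min?_isMin hm0 _ hkC
        have h2 : (k : Int) ≤ m0 := hbound m0 (PySem.List.min?_mem hm0)
        have : m0 = (k : Int) := le_antisymm h1 h2
        subst this
        simp

-- the fill-by-index loop is a map
theorem foldl_set_aux (xs : List Int) (f : Int → Int) (a : Nat) (acc : List Int)
    (hlen : acc.length = xs.length) :
    (PySem.List.pyRange (a : Int) (PySem.List.len xs) 1).foldl
      (fun assigned i => assigned.set i.toNat (f (PySem.List.pyGetD xs i 0))) acc
    = acc.take a ++ ((xs.drop a).map f) := by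
  by_cases ha : a < xs.length
  · rw [PySem.List.pyRange_one_cons (by simp [PySem.List.len]; omega), List.foldl_cons]
    have h1 : ((a : Int) + 1) = ((a + 1 : Nat) : Int) := by push_cast; ring
    have h2 : ((a : Int)).toNat = a := rfl
    rw [h1, foldl_set_aux xs f (a+1) _ (by simp [hlen])]
    rw [h2]
    have hgd : PySem.List.pyGetD xs (a : Int) 0 = xs[a] := by
      rw [PySem.List.pyGetD_natCast, List.getD_eq_getElem _ _ ha]
    rw [hgd]
    have hdrop : xs.drop a = xs[a] :: xs.drop (a + 1) := List.drop_eq_getElem_cons ha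
    have htake : (acc.set a (f xs[a])).take (a + 1) = acc.take a ++ [f xs[a]] := by
      rw [List.take_add_one]
      have hta : (acc.set a (f xs[a])).take a = acc.take a := by
        rw [List.take_set]; apply List.set_eq_of_length_le; simp
      have htb : (acc.set a (f xs[a]))[a]? = some (f xs[a]) := by
        simp [hlen, ha]
      rw [hta, htb]
      rfl
    rw [htake, hdrop, List.map_cons]
    simp
  · rw [PySem.List.pyRange_one_eq_nil (by simp [PySem.List.len]; omega), List.foldl_nil,
      List.take_of_length_le (by omega), List.drop_of_length_le (by omega)]
    simp
termination_by xs.length - a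

theorem foldl_set_eq_map (xs : List Int) (f : Int → Int) :
    (PySem.List.pyRange 0 (PySem.List.len xs) 1).foldl
      (fun assigned i => assigned.set i.toNat (f (PySem.List.pyGetD xs i 0)))
      (PySem.List.pyRepeat [-1] (PySem.List.len xs))
    = xs.map f := by
  have h := foldl_set_aux xs f 0 (List.replicate (PySem.List.len xs).toNat (-1))
    (by simp [PySem.List.len])
  simp only [Nat.cast_zero] at h
  rw [PySem.List.pyRepeat_singleton, h]
  simp

-- ===== VERDICT (by name: the statement is the Claim_ definition above) =====
theorem assign_elements_spec : Claim_equal_assign_elements := by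
  intro groups elements _
  unfold Spec_assign_elements assign_elements assign_elements_alt
  have h := foldl_set_eq_map groups (fun g => (pvDivLoop g (pvElemMap elements) 1 none).getD (-1))
  simp only at h ⊢
  rw [h]
  exact List.map_congr_left (fun g _ => perGroup g elements)
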